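-- pv_equiv track=rewrite | github.com/Exotik850/RandomProjects | mathChallenges.py | areaTiles
-- ===== SOURCE A (Python) =====
-- def areaTiles(w, h):
--     if w == 0 or h == 0:
--         return 0
--     elif w % 2 == 0 and h % 2 == 0:
--         return areaTiles(int(w / 2), int(h / 2))
--     elif w % 2 == 0 and h % 2 == 1:
--         return w + areaTiles(int(w / 2), int(h / 2))
--     elif w % 2 == 1 and h % 2 == 0:
--         return h + areaTiles(int(w / 2), int(h / 2))
--     else:
--         return w + (h - 1) + areaTiles(int(w / 2), int(h / 2))
-- ===== SOURCE B (Python) =====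
-- def areaTiles(w, h):
--     total = 0
--     while w != 0 and h != 0:
--         if w % 2 == 0 and h % 2 == 1:
--             total += w
--         elif w % 2 == 1 and h % 2 == 0:
--             total += h
--         elif w % 2 == 1 and h % 2 == 1:
--             total += w + (h - 1)
--         w = int(w / 2)
--         h = int(h / 2)
--     return total
-- ===== Notes on version B (the rewrite author's own statement) =====
-- stated objective: alternative
-- what changed: The tail recursion is replaced by an explicit while-loop with a running total accumulator; the per-step contribution and the truncating halving are the same.
import Mathlib
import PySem

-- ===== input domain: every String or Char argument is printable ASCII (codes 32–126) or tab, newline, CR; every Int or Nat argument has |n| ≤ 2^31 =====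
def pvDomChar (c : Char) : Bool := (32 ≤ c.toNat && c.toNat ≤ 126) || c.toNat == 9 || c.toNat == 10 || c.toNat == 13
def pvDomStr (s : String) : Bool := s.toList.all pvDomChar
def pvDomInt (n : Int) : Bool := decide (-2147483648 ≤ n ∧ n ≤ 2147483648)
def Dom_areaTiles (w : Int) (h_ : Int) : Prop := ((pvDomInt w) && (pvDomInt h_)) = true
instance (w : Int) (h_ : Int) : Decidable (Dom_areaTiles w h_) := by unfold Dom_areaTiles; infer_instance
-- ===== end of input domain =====

-- B replaces A's tail recursion by an accumulator loop with the same branch arithmetic (objective: alternative decomposition).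
-- Python's int(w / 2) truncates toward zero; on |w| ≤ 2^31 the float division is exact, so it is Int.tdiv.

-- ===== PORT A =====
def areaTiles (w : Int) (h_ : Int) : Int :=
  if w = 0 ∨ h_ = 0 then 0
  else if PySem.Int.mod w 2 = 0 ∧ PySem.Int.mod h_ 2 = 0 then
    areaTiles (Int.tdiv w 2) (Int.tdiv h_ 2)
  else if PySem.Int.mod w 2 = 0 ∧ PySem.Int.mod h_ 2 = 1 then
    w + areaTiles (Int.tdiv w 2) (Int.tdiv h_ 2)
  else if PySem.Int.mod w 2 = 1 ∧ PySem.Int.mod h_ 2 = 0 then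
    h_ + areaTiles (Int.tdiv w 2) (Int.tdiv h_ 2)
  else
    w + (h_ - 1) + areaTiles (Int.tdiv w 2) (Int.tdiv h_ 2)
termination_by w.natAbs
decreasing_by
  all_goals
    simp only [not_or] at *
    rw [Int.natAbs_tdiv]
    exact Nat.div_lt_self (by omega) (by omega)

-- ===== PORT B =====
-- the while loop of Source B, as a tail-recursive function over the loop state (w, h, total)
def areaTilesLoop (w : Int) (h_ : Int) (total : Int) : Int :=
  if w ≠ 0 ∧ h_ ≠ 0 then
    let total' :=
      if PySem.Int.mod w 2 = 0 ∧ PySem.Int.mod h_ 2 = 1 then total + w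
      else if PySem.Int.mod w 2 = 1 ∧ PySem.Int.mod h_ 2 = 0 then total + h_
      else if PySem.Int.mod w 2 = 1 ∧ PySem.Int.mod h_ 2 = 1 then total + (w + (h_ - 1))
      else total
    areaTilesLoop (Int.tdiv w 2) (Int.tdiv h_ 2) total'
  else total
termination_by w.natAbs
decreasing_by
  rw [Int.natAbs_tdiv]
  exact Nat.div_lt_self (by omega) (by omega)

def areaTiles_alt (w : Int) (h_ : Int) : Int := areaTilesLoop w h_ 0

-- ===== PRECONDITION & SPEC =====
def Spec_areaTiles (w : Int) (h_ : Int) (out : Int) : Prop := out = areaTiles_alt w h_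
instance (w : Int) (h_ : Int) (out : Int) : Decidable (Spec_areaTiles w h_ out) := by unfold Spec_areaTiles; infer_instance

-- ===== CLAIM (what is proved, stated in full; the proofs are below) =====
def Claim_equal_areaTiles : Prop := ∀ (w : Int) (h_ : Int), Dom_areaTiles w h_ → Spec_areaTiles w h_ (areaTiles w h_)

-- ===== LEMMAS AND PROOFS =====

-- loop invariant: the loop adds areaTiles w h_ to whatever is already in the accumulator
theorem areaTilesLoop_eq (w : Int) (h_ : Int) (total : Int) :
    areaTilesLoop w h_ total = total + areaTiles w h_ := by
  induction w, h_, total using areaTilesLoop.induct with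
  | case1 w h_ total hcond _t ih =>
    rw [areaTilesLoop]
    simp only [if_pos hcond]
    have ih' : areaTilesLoop (Int.tdiv w 2) (Int.tdiv h_ 2)
        (if PySem.Int.mod w 2 = 0 ∧ PySem.Int.mod h_ 2 = 1 then total + w
         else if PySem.Int.mod w 2 = 1 ∧ PySem.Int.mod h_ 2 = 0 then total + h_
         else if PySem.Int.mod w 2 = 1 ∧ PySem.Int.mod h_ 2 = 1 then total + (w + (h_ - 1)) else total)
      = (if PySem.Int.mod w 2 = 0 ∧ PySem.Int.mod h_ 2 = 1 then total + w
         else if PySem.Int.mod w 2 = 1 ∧ PySem.Int.mod h_ 2 = 0 then total + h_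
         else if PySem.Int.mod w 2 = 1 ∧ PySem.Int.mod h_ 2 = 1 then total + (w + (h_ - 1)) else total)
        + areaTiles (Int.tdiv w 2) (Int.tdiv h_ 2) := ih
    rw [ih']
    conv_rhs => rw [areaTiles]
    rw [if_neg (not_or.mpr hcond)]
    rcases PySem.Int.mod_two_eq w with hw | hw <;> rcases PySem.Int.mod_two_eq h_ with hh | hh <;>
      simp only [hw, hh] <;> norm_num <;> ring
  | case2 w h_ total hcond =>
    rw [areaTilesLoop, if_neg hcond, areaTiles, if_pos (by tauto)]
    ring

-- ===== VERDICT (by name: the statement is the Claim_ definition above) =====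
theorem areaTiles_spec : Claim_equal_areaTiles := by
  intro w h_ _
  unfold Spec_areaTiles areaTiles_alt
  rw [areaTilesLoop_eq]
  ring
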